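-- pv_equiv track=rewrite | github.com/smitdylan2001/GnIAdventOfCode2018 | Aaron/1.py | orderedInsert
-- ===== SOURCE A (Python) =====
-- def orderedInsert (arr, target):
--     arr.append(arr[-1]) # add target to end as starting position of new value
--     i = len(arr)-1
--     while (i > 0) and (target < arr[i-1]):
--         arr[i] = arr[i-1]
--         i = i - 1
--     arr[i] = target
--
--     #if we insert next to ourselves, we found it!
--     if arr[i-1] == target:
--         return True
--     else:
--         return False
-- ===== SOURCE B (Python) =====
-- def orderedInsert(arr, target):
--     # One forward pass: remember the position after the last element <= target
--     # and whether that element equals target; then a single list.insert.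
--     pos = 0
--     found = False
--     for k, v in enumerate(arr):
--         if v <= target:
--             pos = k + 1
--             found = (v == target)
--     arr.insert(pos, target)
--     return found
-- ===== Notes on version B (the rewrite author's own statement) =====
-- stated objective: simpler
-- what changed: A appends a copy of the last element and shifts elements rightward in a backward while-loop, then tests arr[i-1] with Python's negative-index wraparound; B does one forward pass that records the position after the last element <= target and whether that element equals target, then a single list.insert.
import Mathlib
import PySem

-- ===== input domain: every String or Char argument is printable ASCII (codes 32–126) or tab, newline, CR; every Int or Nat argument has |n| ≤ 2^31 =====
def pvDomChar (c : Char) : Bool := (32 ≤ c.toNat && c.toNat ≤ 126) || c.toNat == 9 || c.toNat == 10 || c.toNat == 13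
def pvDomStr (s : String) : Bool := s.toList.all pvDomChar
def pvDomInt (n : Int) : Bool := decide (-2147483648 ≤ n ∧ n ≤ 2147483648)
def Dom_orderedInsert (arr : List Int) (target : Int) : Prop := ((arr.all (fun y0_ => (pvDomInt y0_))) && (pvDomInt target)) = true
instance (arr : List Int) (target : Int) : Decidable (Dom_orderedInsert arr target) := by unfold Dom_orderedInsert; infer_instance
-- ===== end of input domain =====

-- B replaces A's append-and-shift insertion (with its arr[-1] wraparound duplicate check)
-- by one forward pass that finds the insertion point and the duplicate flag, then list.insert;
-- equivalence is about the return value (both versions in fact mutate arr into the same list).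

-- ===== PORT A =====
-- the while loop: state is (arr, i); one step per iteration, reading arr[i-1]
def orderedInsertLoopA (arr : List Int) (i : Nat) (target : Int) : List Int × Nat :=
  match i with
  | 0 => (arr, 0)
  | j+1 =>
    match arr[j]? with
    | none => (arr, j+1)      -- never reached from an in-range start (totality guard)
    | some v =>
      if target < v then orderedInsertLoopA (arr.set (j+1) v) j target
      else (arr, j+1)

-- the final 'if arr[i-1] == target' (arr[i-1] wraps around when i = 0)
def orderedInsertCheck (a3 : List Int) (i : Nat) (target : Int) : Bool :=
  match PySem.List.pyGet? a3 ((i : Int) - 1) with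
  | none => false
  | some v => v == target

def orderedInsert (arr : List Int) (target : Int) : Bool :=
  match PySem.List.pyGet? arr (-1) with
  | none => false             -- arr[-1] raises IndexError on []; excluded by Pre_
  | some last =>
    let a := arr ++ [last]                                   -- arr.append(arr[-1])
    let r := orderedInsertLoopA a (a.length - 1) target      -- the while loop
    orderedInsertCheck (r.1.set r.2 target) r.2 target       -- arr[i] = target; arr[i-1] == target

-- ===== PORT B =====
def orderedInsert_alt (arr : List Int) (target : Int) : Bool :=
  let st := (PySem.List.enumerate arr).foldl
    (fun (st : Int × Bool) kv => if kv.2 ≤ target then (kv.1 + 1, kv.2 == target) else st)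
    (0, false)
  -- Source B then does arr.insert(st.1, target): in-place mutation, does not affect the return
  st.2

-- ===== PRECONDITION & SPEC =====
-- Pre_ excludes only the empty list, on which A raises IndexError (arr[-1]).
def Pre_orderedInsert (arr : List Int) (target : Int) : Prop := arr ≠ []
instance (arr : List Int) (target : Int) : Decidable (Pre_orderedInsert arr target) := by unfold Pre_orderedInsert; infer_instance
def pvWitness_orderedInsert : List Int × Int := ([0, 2], 1)

def Spec_orderedInsert (arr : List Int) (target : Int) (out : Bool) : Prop := out = orderedInsert_alt arr target
instance (arr : List Int) (target : Int) (out : Bool) : Decidable (Spec_orderedInsert arr target out) := by unfold Spec_orderedInsert; infer_instance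

-- ===== CLAIM (what is proved, stated in full; the proofs are below) =====
def Claim_equal_orderedInsert : Prop := ∀ (arr : List Int) (target : Int), Dom_orderedInsert arr target → Pre_orderedInsert arr target → Spec_orderedInsert arr target (orderedInsert arr target)

-- ===== LEMMAS AND PROOFS =====

-- common specification: the first element ≤ target in arr scanned from the right,
-- compared with target (false if every element is > target)
def pvLastLE (target : Int) (arr : List Int) : Bool :=
  match arr.reverse.find? (fun v => decide (v ≤ target)) with
  | some v => v == target
  | none => false

theorem pvFoldB (target : Int) (l : List (Int × Int)) (s : Int × Bool) :
    (l.foldl (fun (st : Int × Bool) kv => if kv.2 ≤ target then (kv.1 + 1, kv.2 == target) else st) s).2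
    = match (l.map Prod.snd).reverse.find? (fun v => decide (v ≤ target)) with
      | some v => v == target
      | none => s.2 := by
  induction l generalizing s with
  | nil => simp
  | cons kv l ih =>
    simp only [List.foldl_cons, List.map_cons, List.reverse_cons, List.find?_append, ih]
    cases h : (l.map Prod.snd).reverse.find? (fun v => decide (v ≤ target)) with
    | some v => simp
    | none =>
      by_cases hle : kv.2 ≤ target <;> simp [List.find?, hle]

theorem pvAltEq (arr : List Int) (target : Int) :
    orderedInsert_alt arr target = pvLastLE target arr := by
  unfold orderedInsert_alt pvLastLE
  rw [pvFoldB]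
  rw [PySem.List.map_snd_enumerate]

theorem pvLoopA_spec (target : Int) : ∀ (i : Nat) (a : List Int), i < a.length →
    ((orderedInsertLoopA a i target).1.length = a.length) ∧
    (orderedInsertLoopA a i target).2 ≤ i ∧
    (∀ j, j ≤ (orderedInsertLoopA a i target).2 ∨ i < j → (orderedInsertLoopA a i target).1[j]? = a[j]?) ∧
    (∀ j, (orderedInsertLoopA a i target).2 < j → j ≤ i → (orderedInsertLoopA a i target).1[j]? = a[j-1]?) ∧
    (0 < (orderedInsertLoopA a i target).2 → ∃ v, a[(orderedInsertLoopA a i target).2 - 1]? = some v ∧ v ≤ target) ∧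
    (∀ k, (orderedInsertLoopA a i target).2 ≤ k → k < i → ∃ v, a[k]? = some v ∧ target < v) := by
  intro i
  induction i with
  | zero =>
    intro a _
    exact ⟨rfl, Nat.le_refl 0, fun j _ => rfl,
      fun j h1 h2 => absurd (Nat.lt_of_lt_of_le h1 h2) (Nat.lt_irrefl 0),
      fun hh => absurd hh (Nat.lt_irrefl 0),
      fun k h1 h2 => absurd h2 (Nat.not_lt_zero k)⟩
  | succ i0 ih =>
    intro a hlt
    have hj : i0 < a.length := by omega
    have hv : a[i0]? = some a[i0] := List.getElem?_eq_getElem hj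
    by_cases hc : target < a[i0]
    · -- loop body runs: shift a[i0] into slot i0+1 and recurse
      have hL2 : (a.set (i0+1) a[i0]).length = a.length := by simp
      obtain ⟨hL, hle, hunch, hshift, hstop, hrange⟩ := ih (a.set (i0+1) a[i0]) (by omega)
      simp only [orderedInsertLoopA, hv, if_pos hc]
      set r := orderedInsertLoopA (a.set (i0+1) a[i0]) i0 target with hr
      have hne : ∀ m, m ≠ i0+1 → (a.set (i0+1) a[i0])[m]? = a[m]? := by
        intro m hm; exact List.getElem?_set_ne (fun hx => hm hx.symm)
      have hself : (a.set (i0+1) a[i0])[i0+1]? = some a[i0] := List.getElem?_set_self hlt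
      refine ⟨hL.trans hL2, by omega, ?_, ?_, ?_, ?_⟩
      · intro m hm
        rcases hm with hm | hm
        · rw [hunch m (Or.inl hm), hne m (by omega)]
        · rw [hunch m (Or.inr (by omega)), hne m (by omega)]
      · intro m h1 h2
        by_cases hmj : m = i0 + 1
        · subst hmj
          rw [hunch (i0+1) (Or.inr (by omega)), hself]
          simp [hv]
        · rw [hshift m h1 (by omega), hne (m-1) (by omega)]
      · intro hp
        obtain ⟨v, hv1, hv2⟩ := hstop hp
        exact ⟨v, by rw [← hne (r.2 - 1) (by omega)]; exact hv1, hv2⟩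
      · intro k h1 h2
        by_cases hki : k = i0
        · subst hki; exact ⟨a[k], hv, hc⟩
        · obtain ⟨v, hv1, hv2⟩ := hrange k h1 (by omega)
          exact ⟨v, by rw [← hne k (by omega)]; exact hv1, hv2⟩
    · -- loop stops here
      have he : orderedInsertLoopA a (i0+1) target = (a, i0+1) := by
        unfold orderedInsertLoopA
        rw [hv]
        exact if_neg hc
      rw [he]
      exact ⟨rfl, Nat.le_refl _, fun m _ => rfl,
        fun m h1 h2 => absurd (Nat.lt_of_lt_of_le h1 h2) (Nat.lt_irrefl _),
        fun _ => ⟨a[i0], hv, by omega⟩,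
        fun k h1 h2 => absurd (Nat.lt_of_le_of_lt h1 h2) (Nat.lt_irrefl _)⟩

theorem pvPyGetNegOne (arr : List Int) (h : arr ≠ []) :
    PySem.List.pyGet? arr (-1) = arr[arr.length - 1]? := by
  have h1 : 1 ≤ arr.length := List.length_pos_iff.mpr h
  simp [PySem.List.pyGet?, PySem.List.pyIdx?, h1]

theorem pvCheckEq (a3 : List Int) (i : Nat) (target w : Int)
    (h : PySem.List.pyGet? a3 ((i : Int) - 1) = some w) :
    orderedInsertCheck a3 i target = (w == target) := by
  unfold orderedInsertCheck
  rw [h]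

theorem pvFindRevLast (p : Int → Bool) (arr : List Int) (m : Nat) (hm : m < arr.length)
    (hpm : p arr[m] = true) (hafter : ∀ k, m < k → (h : k < arr.length) → p arr[k] = false) :
    arr.reverse.find? p = some arr[m] := by
  conv_lhs => rw [← List.take_append_drop (m+1) arr]
  rw [List.reverse_append, List.find?_append]
  have hdrop : (arr.drop (m+1)).reverse.find? p = none := by
    rw [List.find?_eq_none]
    intro x hx
    rw [List.mem_reverse, List.mem_iff_getElem] at hx
    obtain ⟨k, hk, hkx⟩ := hx
    rw [List.getElem_drop] at hkx
    have hlen : m + 1 + k < arr.length := by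
      have := hk; simp only [List.length_drop] at this; omega
    have := hafter (m+1+k) (by omega) hlen
    rw [hkx] at this
    simp [this]
  rw [hdrop, Option.none_or]
  have htake : List.take (m+1) arr = List.take m arr ++ [arr[m]] := by
    rw [List.take_succ, List.getElem?_eq_getElem hm]
    rfl
  rw [htake, List.reverse_append, List.reverse_singleton, List.singleton_append,
      List.find?_cons_of_pos hpm]

theorem pvFindRevNone (p : Int → Bool) (arr : List Int)
    (hall : ∀ k, (h : k < arr.length) → p arr[k] = false) :
    arr.reverse.find? p = none := by
  rw [List.find?_eq_none]
  intro x hx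
  rw [List.mem_reverse, List.mem_iff_getElem] at hx
  obtain ⟨k, hk, hkx⟩ := hx
  have := hall k hk
  rw [hkx] at this
  simp [this]

theorem pvAEq (arr : List Int) (target : Int) (h : arr ≠ []) :
    orderedInsert arr target = pvLastLE target arr := by
  have hn : 1 ≤ arr.length := List.length_pos_iff.mpr h
  have hg : PySem.List.pyGet? arr (-1) = some (arr[arr.length - 1]'(by omega)) := by
    rw [pvPyGetNegOne arr h, List.getElem?_eq_getElem (by omega)]
  simp only [orderedInsert, hg]
  have hi : (arr ++ [arr[arr.length - 1]'(by omega)]).length - 1 = arr.length := by simp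
  rw [hi]
  obtain ⟨hL, hle, hunch, hshift, hstop, hrange⟩ :=
    pvLoopA_spec target arr.length (arr ++ [arr[arr.length - 1]'(by omega)]) (by simp)
  set a := arr ++ [arr[arr.length - 1]'(by omega)] with ha
  set r := orderedInsertLoopA a arr.length target with hr
  have haL : a.length = arr.length + 1 := by simp [ha]
  have hmem : ∀ k, k < arr.length → a[k]? = arr[k]? := by
    intro k hk; exact List.getElem?_append_left (by omega)
  rcases Nat.eq_zero_or_pos r.2 with h0 | hpos
  · -- inserted at the front: all elements of arr are > target
    have hall : ∀ k, (hk : k < arr.length) → target < arr[k] := by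
      intro k hk
      obtain ⟨v, hv1, hv2⟩ := hrange k (by omega) hk
      rw [hmem k hk, List.getElem?_eq_getElem hk] at hv1
      have := Option.some.inj hv1
      omega
    have hck : PySem.List.pyGet? (r.1.set r.2 target) ((r.2 : Int) - 1)
        = some (arr[arr.length - 1]'(by omega)) := by
      rw [h0]
      have hne3 : r.1.set 0 target ≠ [] := by
        apply List.ne_nil_of_length_pos
        simp [hL, haL]
      rw [show (((0:Nat) : Int) - 1) = (-1 : Int) by norm_num, pvPyGetNegOne _ hne3]
      have hlen3 : (r.1.set 0 target).length - 1 = arr.length := by simp [hL, haL]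
      rw [hlen3, List.getElem?_set_ne (by omega), hshift arr.length (by omega) (by omega),
          hmem (arr.length - 1) (by omega), List.getElem?_eq_getElem (by omega)]
    rw [pvCheckEq _ _ _ _ hck]
    have hfind : pvLastLE target arr = false := by
      unfold pvLastLE
      rw [pvFindRevNone]
      intro k hk
      have := hall k hk
      simp; omega
    rw [hfind]
    have := hall (arr.length - 1) (by omega)
    simp; omega
  · -- inserted just after a[r.2 - 1] ≤ target, the rightmost element ≤ target
    obtain ⟨v, hv1, hv2⟩ := hstop hpos
    have hm : r.2 - 1 < arr.length := by omega
    have hv1' : arr[r.2 - 1]? = some v := by rw [← hmem (r.2-1) hm]; exact hv1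
    have hva : arr[r.2-1]'hm = v := by
      rw [List.getElem?_eq_getElem hm] at hv1'
      exact Option.some.inj hv1'
    have hck : PySem.List.pyGet? (r.1.set r.2 target) ((r.2 : Int) - 1) = some v := by
      rw [show ((r.2 : Int) - 1) = ((r.2 - 1 : Nat) : Int) by omega, PySem.List.pyGet?_natCast,
          List.getElem?_set_ne (by omega), hunch (r.2 - 1) (Or.inl (by omega))]
      exact hv1
    rw [pvCheckEq _ _ _ _ hck]
    have hfind : pvLastLE target arr = (v == target) := by
      unfold pvLastLE
      rw [pvFindRevLast _ arr (r.2 - 1) hm (by rw [hva]; simp [hv2]) ?_, hva]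
      intro k hk hkn
      obtain ⟨w, hw1, hw2⟩ := hrange k (by omega) hkn
      rw [hmem k hkn, List.getElem?_eq_getElem hkn] at hw1
      have := Option.some.inj hw1
      simp; omega
    rw [hfind]

-- ===== VERDICT (by name: the statement is the Claim_ definition above) =====
theorem orderedInsert_spec : Claim_equal_orderedInsert := by
  intro arr target _ hpre
  unfold Spec_orderedInsert
  rw [pvAEq arr target hpre, pvAltEq]
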